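-- pv_equiv track=rewrite | github.com/pypi-data/pypi-mirror-401 | packages/inceptbench/inceptbench-2.3.0-py3-none-any.whl/inceptbench/core/utils/json_repair.py | _json_starts
-- ===== SOURCE A (Python) =====
-- from typing import Any, Optional, List, Dict
--
-- def _is_escaped(s: str, i: int) -> bool:
--     """True if the quote at s[i] is escaped by an odd number of backslashes."""
--     backslashes = 0
--     j = i - 1
--     while j >= 0 and s[j] == '\\':
--         backslashes += 1
--         j -= 1
--     return (backslashes % 2) == 1
--
-- def _json_starts(s: str) -> List[int]:
--     """Indices of '{' or '[' that are not inside a double-quoted string."""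
--     starts = []
--     in_string = False
--     for i, ch in enumerate(s):
--         if ch == '"' and not _is_escaped(s, i):
--             in_string = not in_string
--         elif not in_string and ch in '{[':
--             starts.append(i)
--     return starts
-- ===== SOURCE B (Python) =====
-- from typing import List
--
-- def _json_starts(s: str) -> List[int]:
--     """Indices of '{' or '[' that are not inside a double-quoted string."""
--     starts = []
--     in_string = False
--     esc = False  # parity of the backslash run ending just before the current char
--     for i, ch in enumerate(s):
--         if ch == '\\':
--             esc = not esc
--             continue
--         if ch == '"' and not esc:
--             in_string = not in_string
--         elif not in_string and ch in '{[':
--             starts.append(i)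
--         esc = False
--     return starts
-- ===== Notes on version B (the rewrite author's own statement) =====
-- stated objective: alternative
-- what changed: Replaces the per-quote backward scan of preceding backslashes with a single forward pass that maintains the escape parity incrementally.
import Mathlib
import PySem

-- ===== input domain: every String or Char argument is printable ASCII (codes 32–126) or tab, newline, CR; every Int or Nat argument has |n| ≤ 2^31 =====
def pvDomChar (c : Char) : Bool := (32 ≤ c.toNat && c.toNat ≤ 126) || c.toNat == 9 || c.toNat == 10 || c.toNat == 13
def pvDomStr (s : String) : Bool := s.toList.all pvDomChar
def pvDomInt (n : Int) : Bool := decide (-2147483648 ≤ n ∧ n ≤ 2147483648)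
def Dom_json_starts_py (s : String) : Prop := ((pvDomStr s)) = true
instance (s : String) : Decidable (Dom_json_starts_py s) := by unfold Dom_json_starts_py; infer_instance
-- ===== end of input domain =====

-- B replaces A's per-quote backward backslash scan with a single forward pass
-- that tracks the escape parity incrementally (a different, single-pass algorithm).


-- ===== PORT A =====
-- backward while-loop of _is_escaped: count backslashes at indices j = i-1, i-2, …
def escGo (l : List Char) : Nat → Nat → Nat
  | 0, acc => acc
  | j + 1, acc => if l.getD j ' ' == '\\' then escGo l j (acc + 1) else acc

def isEscaped (l : List Char) (i : Nat) : Bool := escGo l i 0 % 2 == 1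

-- the for-loop of _json_starts, as index-tracking recursion over the remaining chars
def aLoop (l : List Char) : Nat → List Char → List Int × Bool → List Int × Bool
  | _, [], st => st
  | i, ch :: rest, (starts, inStr) =>
    if ch == '"' && !isEscaped l i then aLoop l (i + 1) rest (starts, !inStr)
    else if !inStr && (ch == '{' || ch == '[') then
      aLoop l (i + 1) rest (starts ++ [(i : Int)], inStr)
    else aLoop l (i + 1) rest (starts, inStr)

def json_starts_py (s : String) : List Int :=
  (aLoop s.toList 0 s.toList ([], false)).1

-- ===== PORT B =====
-- single forward pass; esc = parity of the backslash run ending just before index i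
def bLoop : Nat → List Char → List Int → Bool → Bool → List Int
  | _, [], starts, _, _ => starts
  | i, ch :: rest, starts, inStr, esc =>
    if ch == '\\' then bLoop (i + 1) rest starts inStr (!esc)
    else if ch == '"' && !esc then bLoop (i + 1) rest starts (!inStr) false
    else if !inStr && (ch == '{' || ch == '[') then
      bLoop (i + 1) rest (starts ++ [(i : Int)]) inStr false
    else bLoop (i + 1) rest starts inStr false

def json_starts_py_alt (s : String) : List Int :=
  bLoop 0 s.toList [] false false

-- ===== PRECONDITION & SPEC =====
def Spec_json_starts_py (s : String) (out : List Int) : Prop := out = json_starts_py_alt s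
instance (s : String) (out : List Int) : Decidable (Spec_json_starts_py s out) := by unfold Spec_json_starts_py; infer_instance

-- ===== CLAIM (what is proved, stated in full; the proofs are below) =====
def Claim_equal_json_starts_py : Prop := ∀ (s : String), Dom_json_starts_py s → Spec_json_starts_py s (json_starts_py s)

-- ===== LEMMAS AND PROOFS =====
theorem escGo_acc (l : List Char) (j : Nat) : ∀ acc, escGo l j acc = escGo l j 0 + acc := by
  induction j with
  | zero => intro acc; simp [escGo]
  | succ j ih =>
    intro acc
    simp only [escGo]
    split
    · rw [ih (acc + 1), ih 1]; omega
    · omega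

theorem escGo_succ (l : List Char) (i : Nat) :
    escGo l (i + 1) 0 = if l.getD i ' ' == '\\' then escGo l i 0 + 1 else 0 := by
  simp only [escGo]
  split
  · rw [escGo_acc]
  · rfl

theorem isEscaped_succ (l : List Char) (i : Nat) (ch : Char) (h : l.getD i ' ' = ch) :
    isEscaped l (i + 1) = if ch == '\\' then !isEscaped l i else false := by
  subst h
  simp only [isEscaped, escGo_succ]
  by_cases hc : (l.getD i ' ' == '\\') = true
  · simp only [if_pos hc]
    rcases Nat.mod_two_eq_zero_or_one (escGo l i 0) with h2 | h2 <;>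
      simp [Nat.add_mod, h2]
  · have hc' : l.getD i ' ' ≠ '\\' := by simpa using hc
    simp [List.getD] at hc' ⊢
    simp [hc']

theorem drop_cons_getD (l : List Char) (i : Nat) (ch : Char) (rest : List Char)
    (h : l.drop i = ch :: rest) : l.getD i ' ' = ch := by
  have h0 : (l.drop i)[0]? = some ch := by rw [h]; rfl
  rw [List.getElem?_drop] at h0
  simp only [Nat.add_zero] at h0
  simp [List.getD, h0]

theorem drop_cons_succ (l : List Char) (i : Nat) (ch : Char) (rest : List Char)
    (h : l.drop i = ch :: rest) : l.drop (i + 1) = rest := by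
  have h1 := congrArg (List.drop 1) h
  simpa [List.drop_drop, Nat.add_comm] using h1

theorem loop_agree (l : List Char) (rest : List Char) :
    ∀ i starts inStr esc, l.drop i = rest → esc = isEscaped l i →
      (aLoop l i rest (starts, inStr)).1 = bLoop i rest starts inStr esc := by
  induction rest with
  | nil => intro i starts inStr esc _ _; simp [aLoop, bLoop]
  | cons ch rest ih =>
    intro i starts inStr esc hdrop hesc
    have hch := drop_cons_getD l i ch rest hdrop
    have hdrop' := drop_cons_succ l i ch rest hdrop
    have hnext := isEscaped_succ l i ch hch
    subst hesc
    simp only [aLoop, bLoop]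
    by_cases hbs : ch = '\\'
    · subst hbs
      have hA1 : ¬((('\\' : Char) == '"' && !isEscaped l i) = true) := by simp
      have hA2 : ¬((!inStr && (('\\' : Char) == '{' || ('\\' : Char) == '[')) = true) := by
        simp
      rw [if_neg hA1, if_neg hA2, if_pos (show (('\\' : Char) == '\\') = true by decide)]
      exact ih (i + 1) starts inStr _ hdrop' (by rw [hnext]; simp)
    · have hB : ¬((ch == '\\') = true) := by simp [hbs]
      have hesc' : isEscaped l (i + 1) = false := by rw [hnext]; simp [hbs]
      rw [if_neg hB]
      by_cases hq : (ch == '"' && !isEscaped l i) = true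
      · rw [if_pos hq, if_pos hq]
        exact ih (i + 1) starts (!inStr) _ hdrop' hesc'.symm
      · rw [if_neg hq, if_neg hq]
        by_cases hb : (!inStr && (ch == '{' || ch == '[')) = true
        · rw [if_pos hb, if_pos hb]
          exact ih (i + 1) (starts ++ [(i : Int)]) inStr _ hdrop' hesc'.symm
        · rw [if_neg hb, if_neg hb]
          exact ih (i + 1) starts inStr _ hdrop' hesc'.symm

-- ===== VERDICT (by name: the statement is the Claim_ definition above) =====
theorem json_starts_py_spec : Claim_equal_json_starts_py := by
  intro s _
  unfold Spec_json_starts_py json_starts_py json_starts_py_alt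
  exact loop_agree s.toList s.toList 0 [] false false rfl (by simp [isEscaped, escGo])
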